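-- pv_equiv track=rewrite | github.com/zbrdc/delia | tools/add_license_headers.py | is_license_content
-- ===== SOURCE A (Python) =====
-- def is_license_content(text):
--     keywords = [
--         "Copyright (C)",
--         "This program is free software",
--         "GNU General Public License",
--         "SPDX-License-Identifier",
--         "WITHOUT ANY WARRANTY",
--         "gnu.org/licenses",
--         "Free Software Foundation",
--         "later version",
--         "distributed in the hope",
--         "MERCHANTABILITY or FITNESS"
--     ]
--     return any(k in text for k in keywords)
-- ===== SOURCE B (Python) =====
-- def is_license_content(text):
--     keywords = [
--         "Copyright (C)",
--         "This program is free software",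
--         "GNU General Public License",
--         "SPDX-License-Identifier",
--         "WITHOUT ANY WARRANTY",
--         "gnu.org/licenses",
--         "Free Software Foundation",
--         "later version",
--         "distributed in the hope",
--         "MERCHANTABILITY or FITNESS"
--     ]
--     # single left-to-right scan: at each position test whether some keyword starts there
--     for i in range(len(text) + 1):
--         for k in keywords:
--             if text.startswith(k, i):
--                 return True
--     return False
-- ===== Notes on version B (the rewrite author's own statement) =====
-- stated objective: alternative
-- what changed: Replaced the ten independent whole-text substring searches (one per keyword) with a single left-to-right scan over the text that tests at each position whether any keyword starts there, via str.startswith with an offset.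
import Mathlib
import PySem

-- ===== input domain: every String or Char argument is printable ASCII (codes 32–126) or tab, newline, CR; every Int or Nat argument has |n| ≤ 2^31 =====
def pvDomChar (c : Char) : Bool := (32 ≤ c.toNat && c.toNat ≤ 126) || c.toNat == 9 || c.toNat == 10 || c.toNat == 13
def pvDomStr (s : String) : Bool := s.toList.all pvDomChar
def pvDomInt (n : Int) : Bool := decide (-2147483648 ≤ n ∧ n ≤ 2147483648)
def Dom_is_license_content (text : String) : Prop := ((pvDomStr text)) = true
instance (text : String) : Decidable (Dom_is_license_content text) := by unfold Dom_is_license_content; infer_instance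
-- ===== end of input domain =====

-- B replaces ten independent substring searches with one left-to-right scan testing keyword prefixes at each position (alternative decomposition, same result).


-- the shared literal keyword list
def licKeywords : List String := [
  "Copyright (C)",
  "This program is free software",
  "GNU General Public License",
  "SPDX-License-Identifier",
  "WITHOUT ANY WARRANTY",
  "gnu.org/licenses",
  "Free Software Foundation",
  "later version",
  "distributed in the hope",
  "MERCHANTABILITY or FITNESS"]

-- ===== PORT A =====
-- A: any(k in text for k in keywords) — ten substring searches
def is_license_content (text : String) : Bool :=
  licKeywords.any (fun k => PySem.Str.isIn k text)

-- ===== PORT B =====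
-- B's inner loop: does some keyword start at the head of suffix s?
def licHitHere (s : List Char) : Bool :=
  licKeywords.any (fun k => PySem.Chars.startswith s k.toList)

-- B's outer loop: advance one position at a time (i = 0 .. len(text), suffix s = text[i:])
def licScan (s : List Char) : Bool :=
  if licHitHere s then true
  else
    match s with
    | [] => false
    | _ :: rest => licScan rest

def is_license_content_alt (text : String) : Bool :=
  licScan text.toList

-- ===== PRECONDITION & SPEC =====
def Spec_is_license_content (text : String) (out : Bool) : Prop := out = is_license_content_alt text
instance (text : String) (out : Bool) : Decidable (Spec_is_license_content text out) := by unfold Spec_is_license_content; infer_instance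

-- ===== CLAIM (what is proved, stated in full; the proofs are below) =====
def Claim_equal_is_license_content : Prop := ∀ (text : String), Dom_is_license_content text → Spec_is_license_content text (is_license_content text)

-- ===== LEMMAS AND PROOFS =====

-- 'k in []' is exactly '[] startswith k' (both hold iff k = [])
lemma licIsIn_nil (k : List Char) :
    PySem.Chars.isIn k [] = PySem.Chars.startswith [] k := by
  rw [Bool.eq_iff_iff]
  simp [PySem.Chars.isIn_iff_infix, PySem.Chars.startswith_iff]

-- 'k in c::rest' splits into a match at the head or a match further right
lemma licIsIn_cons (k : List Char) (c : Char) (rest : List Char) :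
    PySem.Chars.isIn k (c :: rest)
      = (PySem.Chars.startswith (c :: rest) k || PySem.Chars.isIn k rest) := by
  rw [Bool.eq_iff_iff]
  simp [PySem.Chars.isIn_iff_infix, PySem.Chars.startswith_iff, List.infix_cons_iff]

-- the scan over all suffixes finds exactly the keywords occurring as a substring
lemma licScan_eq (s : List Char) :
    licScan s = licKeywords.any (fun k => PySem.Chars.isIn k.toList s) := by
  induction s with
  | nil =>
      rw [Bool.eq_iff_iff]
      simp [licScan, licHitHere, licIsIn_nil]
  | cons c rest ih =>
      rw [Bool.eq_iff_iff]
      simp [licScan, licHitHere, licIsIn_cons, ih]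
      aesop

-- ===== VERDICT (by name: the statement is the Claim_ definition above) =====
theorem is_license_content_spec : Claim_equal_is_license_content := by
  intro text _
  unfold Spec_is_license_content is_license_content is_license_content_alt
  rw [licScan_eq]
  rw [Bool.eq_iff_iff]
  simp [PySem.Chars.isIn_iff_infix]
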